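-- pv_equiv track=rewrite | github.com/SveterCZE/justice | update_db.py | lower_names_chars
-- ===== SOURCE A (Python) =====
-- def lower_names_chars(string_name):
--     if string_name == None:
--         return None
--     else:
--         updated_name = ""
--         previous_non_alpha = True
--         for elem in string_name:
--             if previous_non_alpha == True:
--                 updated_name += elem
--             else:
--                 updated_name += elem.lower()
--             if elem.isalpha() == True:
--                 previous_non_alpha = False
--             else:
--                 previous_non_alpha = True
--         return updated_name
-- ===== SOURCE B (Python) =====
-- # B: run-based rewrite — split the string into maximal alpha runs; keep the first
-- # char of each run, lowercase the rest of the run, copy non-alpha chars verbatim.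
-- def _split_alpha_run(s):
--     # maximal alpha prefix of s, and the remainder
--     for i, c in enumerate(s):
--         if not c.isalpha():
--             return s[:i], s[i:]
--     return s, ""
--
-- def lower_names_chars(string_name):
--     if string_name is None:
--         return None
--     pieces = []
--     rest = string_name
--     while rest:
--         if rest[0].isalpha():
--             run, rest = _split_alpha_run(rest)
--             pieces.append(run[0] + run[1:].lower())
--         else:
--             pieces.append(rest[0])
--             rest = rest[1:]
--     return "".join(pieces)
-- ===== Notes on version B (the rewrite author's own statement) =====
-- stated objective: faster
-- what changed: Replaces A's char-by-char loop (quadratic string += with a previous-non-alpha flag) by a run-based scan: split off each maximal alphabetic run, keep its first character and lowercase the rest in one slice, copy non-alpha characters verbatim, and join the pieces once.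
import Mathlib
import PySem

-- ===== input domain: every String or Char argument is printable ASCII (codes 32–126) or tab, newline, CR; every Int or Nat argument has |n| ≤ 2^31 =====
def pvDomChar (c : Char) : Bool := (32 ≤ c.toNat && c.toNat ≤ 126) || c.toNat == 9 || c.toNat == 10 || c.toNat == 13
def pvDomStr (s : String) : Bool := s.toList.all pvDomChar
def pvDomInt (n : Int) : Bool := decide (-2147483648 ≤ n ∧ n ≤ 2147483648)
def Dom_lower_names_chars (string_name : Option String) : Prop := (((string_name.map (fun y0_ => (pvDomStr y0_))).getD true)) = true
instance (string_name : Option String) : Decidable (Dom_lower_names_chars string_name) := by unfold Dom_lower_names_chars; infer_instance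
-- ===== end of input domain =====

-- B replaces A's char-by-char fold with a boolean flag by a run-based scan over maximal
-- alphabetic runs (keep each run's first char, lowercase the rest); same results, proved equal.


-- ===== PORT A =====
-- loop: updated_name accumulator, previous_non_alpha flag
def lowerGoA (acc : List Char) (prev : Bool) : List Char → List Char
  | [] => acc
  | c :: cs =>
      lowerGoA (acc ++ (if prev then [c] else PySem.Chars.lower [c])) (!PySem.Chars.isalpha c) cs

def lower_names_chars (string_name : Option String) : Option String :=
  match string_name with
  | none => none
  | some s => some (String.mk (lowerGoA [] true s.toList))

-- ===== PORT B =====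
-- _split_alpha_run: maximal alpha prefix and the remainder
def splitAlphaRun : List Char → List Char × List Char
  | [] => ([], [])
  | c :: cs =>
      if PySem.Chars.isalpha c then
        let p := splitAlphaRun cs
        (c :: p.1, p.2)
      else ([], c :: cs)

theorem splitAlphaRun_snd_le (cs : List Char) : (splitAlphaRun cs).2.length ≤ cs.length := by
  induction cs with
  | nil => simp [splitAlphaRun]
  | cons c cs ih =>
      simp only [splitAlphaRun]
      split
      · exact Nat.le_trans ih (Nat.le_succ _)
      · simp

-- the while loop of Source B over the remaining suffix
def lowerGoB : List Char → List Char
  | [] => []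
  | c :: cs =>
      if PySem.Chars.isalpha c then
        -- run = c :: (splitAlphaRun cs).1, keep c, lowercase the rest, continue on the remainder
        (c :: PySem.Chars.lower (splitAlphaRun cs).1) ++ lowerGoB (splitAlphaRun cs).2
      else
        [c] ++ lowerGoB cs
termination_by l => l.length
decreasing_by
  · exact Nat.lt_succ_of_le (splitAlphaRun_snd_le cs)
  · simp

def lower_names_chars_alt (string_name : Option String) : Option String :=
  match string_name with
  | none => none
  | some s => some (String.mk (lowerGoB s.toList))

-- ===== PRECONDITION & SPEC =====
def Spec_lower_names_chars (string_name : Option String) (out : Option String) : Prop := out = lower_names_chars_alt string_name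
instance (string_name : Option String) (out : Option String) : Decidable (Spec_lower_names_chars string_name out) := by unfold Spec_lower_names_chars; infer_instance

-- ===== CLAIM (what is proved, stated in full; the proofs are below) =====
def Claim_equal_lower_names_chars : Prop := ∀ (string_name : Option String), Dom_lower_names_chars string_name → Spec_lower_names_chars string_name (lower_names_chars string_name)

-- ===== LEMMAS AND PROOFS =====

-- accumulator-free view of A's loop
def goA (prev : Bool) : List Char → List Char
  | [] => []
  | c :: cs => (if prev then [c] else PySem.Chars.lower [c]) ++ goA (!PySem.Chars.isalpha c) cs

theorem lowerGoA_eq_append (l : List Char) : ∀ (acc : List Char) (prev : Bool),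
    lowerGoA acc prev l = acc ++ goA prev l := by
  induction l with
  | nil => intro acc prev; simp [lowerGoA, goA]
  | cons c cs ih => intro acc prev; simp [lowerGoA, goA, ih]

theorem lowerChar_of_not_alpha (c : Char) (h : PySem.Chars.isalpha c = false) :
    PySem.Chars.lowerChar c = c := by
  simp [PySem.Chars.isalpha] at h
  simp [PySem.Chars.lowerChar, h.1]

theorem goA_false_eq (cs : List Char) :
    goA false cs = PySem.Chars.lower (splitAlphaRun cs).1 ++ goA true (splitAlphaRun cs).2 := by
  induction cs with
  | nil => simp [goA, splitAlphaRun, PySem.Chars.lower]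
  | cons c cs ih =>
      by_cases h : PySem.Chars.isalpha c = true
      · simp [goA, splitAlphaRun, h, PySem.Chars.lower, ih]
      · simp only [Bool.not_eq_true] at h
        simp [goA, splitAlphaRun, h, PySem.Chars.lower, lowerChar_of_not_alpha c h]

theorem goA_true_eq_lowerGoB (l : List Char) : goA true l = lowerGoB l := by
  induction l using lowerGoB.induct with
  | case1 => simp [goA, lowerGoB]
  | case2 c cs h ih =>
      rw [goA, lowerGoB]
      simp only [h, if_pos, Bool.not_true]
      rw [goA_false_eq, ih]
      simp
  | case3 c cs h ih =>
      simp only [Bool.not_eq_true] at h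
      rw [goA, lowerGoB]
      simp [h, ih]

-- ===== VERDICT (by name: the statement is the Claim_ definition above) =====
theorem lower_names_chars_spec : Claim_equal_lower_names_chars := by
  intro s _
  unfold Spec_lower_names_chars lower_names_chars lower_names_chars_alt
  cases s with
  | none => rfl
  | some s => simp [lowerGoA_eq_append, goA_true_eq_lowerGoB]
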